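-- pv_equiv track=rewrite | github.com/Dami-18/AGV | agv1.py | find_conflict
-- ===== SOURCE A (Python) =====
-- def find_conflict(paths):
--     conflicts = []
--     for i in range(len(paths)-1):
--         for j in range(i+1, len(paths)):
--             for k in range(min(len(paths[i]), len(paths[j]))):
--                 if(paths[i][k] == paths[j][k]):
--                     conflicts.append((i+1, j+1, paths[i][k]))
--     return conflicts
-- ===== SOURCE B (Python) =====
-- def find_conflict(paths):
--     maxlen = 0
--     for p in paths:
--         if len(p) > maxlen:
--             maxlen = len(p)
--     by_pair = {}
--     for k in range(maxlen):
--         buckets = {}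
--         for idx in range(len(paths)):
--             p = paths[idx]
--             if k < len(p):
--                 buckets.setdefault(p[k], []).append(idx)
--         for v, idxs in buckets.items():
--             for a in range(len(idxs)):
--                 for b in range(a + 1, len(idxs)):
--                     by_pair.setdefault((idxs[a], idxs[b]), []).append(v)
--     conflicts = []
--     for i in range(len(paths) - 1):
--         for j in range(i + 1, len(paths)):
--             for v in by_pair.get((i, j), ()):
--                 conflicts.append((i + 1, j + 1, v))
--     return conflicts
-- ===== Notes on version B (the rewrite author's own statement) =====
-- stated objective: alternative
-- what changed: Instead of comparing every pair of paths at every timestep (triple nested loop with O(P^2*L) comparisons), B buckets paths by their position in a dict for each timestep, emits each colliding pair found inside a bucket into a per-(i,j) dict, and then outputs the collected conflicts in ascending pair order; on conflict-dense inputs the output size dominates both versions, so a timing run shows no speed-up there.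
import Mathlib
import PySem

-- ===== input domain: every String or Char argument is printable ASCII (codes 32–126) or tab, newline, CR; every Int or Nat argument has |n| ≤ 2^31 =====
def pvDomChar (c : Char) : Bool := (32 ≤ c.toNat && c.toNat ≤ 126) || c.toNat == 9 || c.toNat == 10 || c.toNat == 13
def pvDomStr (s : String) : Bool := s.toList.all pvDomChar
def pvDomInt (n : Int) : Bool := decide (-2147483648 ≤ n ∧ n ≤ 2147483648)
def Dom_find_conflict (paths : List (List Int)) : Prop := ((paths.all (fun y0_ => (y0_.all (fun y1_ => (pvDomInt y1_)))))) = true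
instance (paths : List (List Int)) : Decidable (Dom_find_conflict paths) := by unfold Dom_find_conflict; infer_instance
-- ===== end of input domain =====

-- B replaces A's all-pairs timestep scan by per-timestep dict bucketing of paths by position
-- (colliding pairs are collected into a per-(i,j) dict and emitted in pair order); objective:
-- alternative - it avoids A's pairwise position comparisons, though on conflict-dense inputs the
-- measured time is not better (the output itself dominates).

-- ===== PORT A =====
-- Literal port of A. All list indexing is in range (indices come from range()), so pyGetD with a
-- default is exact there.
def find_conflict (paths : List (List Int)) : List (Int × Int × Int) :=
  (PySem.List.pyRange 0 (PySem.List.len paths - 1)).foldl (fun conflicts i =>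
    (PySem.List.pyRange (i + 1) (PySem.List.len paths)).foldl (fun conflicts j =>
      (PySem.List.pyRange 0 (min (PySem.List.len (PySem.List.pyGetD paths i []))
          (PySem.List.len (PySem.List.pyGetD paths j [])))).foldl (fun conflicts k =>
        if PySem.List.pyGetD (PySem.List.pyGetD paths i []) k 0 =
            PySem.List.pyGetD (PySem.List.pyGetD paths j []) k 0 then
          conflicts ++ [(i + 1, j + 1, PySem.List.pyGetD (PySem.List.pyGetD paths i []) k 0)]
        else conflicts) conflicts) conflicts) []

-- ===== PORT B =====
-- Literal port of B (Source B): buckets.setdefault(x, []).append(y) is Dict.modify x [] (· ++ [y]);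
-- by_pair.get((i, j), ()) only feeds a for loop, ported as Dict.getD (i, j) [].
def find_conflict_alt (paths : List (List Int)) : List (Int × Int × Int) :=
  let maxlen : Int := paths.foldl (fun m p => if PySem.List.len p > m then PySem.List.len p else m) 0
  let byPair : PySem.Dict (Int × Int) (List Int) :=
    (PySem.List.pyRange 0 maxlen).foldl (fun byPair k =>
      let buckets : PySem.Dict Int (List Int) :=
        (PySem.List.pyRange 0 (PySem.List.len paths)).foldl (fun buckets idx =>
          let p := PySem.List.pyGetD paths idx []
          if k < PySem.List.len p then
            buckets.modify (PySem.List.pyGetD p k 0) [] (fun l => l ++ [idx])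
          else buckets) PySem.Dict.empty
      buckets.items.foldl (fun byPair vi =>
        (PySem.List.pyRange 0 (PySem.List.len vi.2)).foldl (fun byPair a =>
          (PySem.List.pyRange (a + 1) (PySem.List.len vi.2)).foldl (fun byPair b =>
            byPair.modify (PySem.List.pyGetD vi.2 a 0, PySem.List.pyGetD vi.2 b 0) []
              (fun l => l ++ [vi.1])) byPair) byPair) byPair) PySem.Dict.empty
  (PySem.List.pyRange 0 (PySem.List.len paths - 1)).foldl (fun conflicts i =>
    (PySem.List.pyRange (i + 1) (PySem.List.len paths)).foldl (fun conflicts j =>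
      (byPair.getD (i, j) []).foldl (fun conflicts v =>
        conflicts ++ [(i + 1, j + 1, v)]) conflicts) conflicts) []

-- ===== PRECONDITION & SPEC =====
def Spec_find_conflict (paths : List (List Int)) (out : List (Int × Int × Int)) : Prop := out = find_conflict_alt paths
instance (paths : List (List Int)) (out : List (Int × Int × Int)) : Decidable (Spec_find_conflict paths out) := by unfold Spec_find_conflict; infer_instance

-- ===== CLAIM (what is proved, stated in full; the proofs are below) =====
def Claim_equal_find_conflict : Prop := ∀ (paths : List (List Int)), Dom_find_conflict paths → Spec_find_conflict paths (find_conflict paths)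

-- ===== LEMMAS AND PROOFS =====

-- Abbreviations for pieces of both programs.
def pvPath (paths : List (List Int)) (i : Int) : List Int := PySem.List.pyGetD paths i []
def pvVal (paths : List (List Int)) (k i : Int) : Int := PySem.List.pyGetD (pvPath paths i) k 0
def pvLk (paths : List (List Int)) (k : Int) : List Int :=
  (PySem.List.pyRange 0 (PySem.List.len paths)).filter
    (fun idx => decide (k < PySem.List.len (pvPath paths idx)))
def pvVals (paths : List (List Int)) (i j : Int) : List Int :=
  ((PySem.List.pyRange 0 (min (PySem.List.len (pvPath paths i)) (PySem.List.len (pvPath paths j)))).filter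
    (fun k => decide (pvVal paths k i = pvVal paths k j))).map (fun k => pvVal paths k i)
def pvMaxlen (paths : List (List Int)) : Int :=
  paths.foldl (fun m p => if PySem.List.len p > m then PySem.List.len p else m) 0
def pvBuckets (paths : List (List Int)) (k : Int) : PySem.Dict Int (List Int) :=
  (PySem.List.pyRange 0 (PySem.List.len paths)).foldl (fun buckets idx =>
    if k < PySem.List.len (pvPath paths idx) then
      buckets.modify (PySem.List.pyGetD (pvPath paths idx) k 0) [] (fun l => l ++ [idx])
    else buckets) PySem.Dict.empty
def pvQk (paths : List (List Int)) (k : Int) : List ((Int × Int) × Int) :=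
  (pvBuckets paths k).items.flatMap (fun vi =>
    (PySem.List.pyRange 0 (PySem.List.len vi.2)).flatMap (fun a =>
      (PySem.List.pyRange (a + 1) (PySem.List.len vi.2)).map (fun b =>
        ((PySem.List.pyGetD vi.2 a 0, PySem.List.pyGetD vi.2 b 0), vi.1))))
def pvStep (d : PySem.Dict (Int × Int) (List Int)) (q : (Int × Int) × Int) :
    PySem.Dict (Int × Int) (List Int) := d.modify q.1 [] (fun l => l ++ [q.2])
def pvByPair (paths : List (List Int)) : PySem.Dict (Int × Int) (List Int) :=
  ((PySem.List.pyRange 0 (pvMaxlen paths)).flatMap (pvQk paths)).foldl pvStep PySem.Dict.empty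
def pvPairs : List Int → List (Int × Int)
  | [] => []
  | x :: t => t.map (fun y => (x, y)) ++ pvPairs t

-- generic list facts
theorem pv_foldl_flatMap {α β γ : Type} (g : α → List β) (f : γ → β → γ) (l : List α) (init : γ) :
    (l.flatMap g).foldl f init = l.foldl (fun a x => (g x).foldl f a) init := by
  induction l generalizing init with
  | nil => rfl
  | cons x t ih => simp [List.foldl_append, ih]

theorem pv_flatMap_ite {α β : Type} (p : α → Prop) [DecidablePred p] (g : α → β) (l : List α) :
    l.flatMap (fun x => if p x then [g x] else []) = (l.filter (fun x => decide (p x))).map g := by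
  induction l with
  | nil => rfl
  | cons x t ih => by_cases h : p x <;> simp [h, ih]

theorem pv_pyRange_one_eq (a b : Int) :
    PySem.List.pyRange a b = (List.range (b - a).toNat).map (fun (t : Nat) => a + (t : Int)) := by
  rw [PySem.List.pyRange_of_pos a b (by norm_num : (0:Int) < 1)]
  have h : (if a < b then ((b - a + 1 - 1)/1).toNat else 0) = (b - a).toNat := by
    split <;> omega
  rw [h]
  simp only [one_mul]

theorem pv_drop_flatMap {γ : Type} (f : Int → Int → γ) (xs : List Int) :
    (List.range xs.length).flatMap (fun a => (xs.drop (a+1)).map (fun y => f (xs.getD a 0) y))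
    = (pvPairs xs).map (fun pr => f pr.1 pr.2) := by
  induction xs with
  | nil => rfl
  | cons x t ih =>
    simp only [List.length_cons, List.range_succ_eq_map, List.flatMap_cons, List.flatMap_map]
    rw [pvPairs]
    simp only [List.map_append, List.map_map]
    refine congrArg₂ _ ?_ ?_
    · simp [Function.comp]
    · rw [← ih]
      apply List.flatMap_congr
      intro a _
      simp only [List.drop_succ_cons, List.getD_cons_succ]

theorem pv_drop_eq_map_range {α : Type} (xs : List α) (s : Nat) (d : α) :
    xs.drop s = (List.range (xs.length - s)).map (fun t => xs.getD (s + t) d) := by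
  induction xs generalizing s with
  | nil => simp
  | cons x t ih =>
    cases s with
    | zero =>
      simp only [List.drop_zero, List.length_cons, Nat.sub_zero, List.range_succ_eq_map]
      simp only [List.map_cons, List.map_map]
      refine congrArg₂ _ rfl ?_
      have := ih 0
      simp only [List.drop_zero, Nat.sub_zero] at this
      conv_lhs => rw [this]
      apply List.map_congr_left
      intro a _
      simp
    | succ s =>
      simp only [List.drop_succ_cons, List.length_cons, Nat.succ_sub_succ]
      rw [ih s]
      apply List.map_congr_left
      intro a _
      simp [Nat.succ_add]

theorem pv_pairs_index_eq {γ : Type} (f : Int → Int → γ) (xs : List Int) :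
    (PySem.List.pyRange 0 (PySem.List.len xs)).flatMap (fun a =>
      (PySem.List.pyRange (a + 1) (PySem.List.len xs)).map (fun b =>
        f (PySem.List.pyGetD xs a 0) (PySem.List.pyGetD xs b 0)))
    = (pvPairs xs).map (fun pr => f pr.1 pr.2) := by
  rw [← pv_drop_flatMap f xs]
  have hlen : PySem.List.len xs = (xs.length : Int) := by simp [PySem.List.len]
  rw [hlen, PySem.List.pyRange_zero_natCast, List.flatMap_map]
  apply List.flatMap_congr
  intro a ha
  rw [pv_pyRange_one_eq, pv_drop_eq_map_range xs (a+1) 0, List.map_map]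
  have hn : ((xs.length : Int) - ((a : Int) + 1)).toNat = xs.length - (a + 1) := by omega
  rw [hn]
  conv_rhs => rw [List.map_map]
  apply List.map_congr_left
  intro t _
  have h1 : ((a : Int) + 1 + (t : Int)) = ((a + 1 + t : Nat) : Int) := by push_cast; ring
  simp only [Function.comp, h1, PySem.List.pyGetD_natCast]

theorem pv_mem_pvPairs {pr : Int × Int} {xs : List Int} (h : pr ∈ pvPairs xs) :
    pr.1 ∈ xs ∧ pr.2 ∈ xs := by
  induction xs with
  | nil => simp [pvPairs] at h
  | cons x t ih =>
    rw [pvPairs] at h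
    rcases List.mem_append.1 h with h | h
    · rcases List.mem_map.1 h with ⟨y, hy, rfl⟩
      exact ⟨by simp, by simp [hy]⟩
    · have := ih h
      exact ⟨List.mem_cons_of_mem _ this.1, List.mem_cons_of_mem _ this.2⟩

theorem pv_filter_pvPairs {xs : List Int} (hs : xs.Pairwise (· < ·)) {i j : Int} (hij : i < j) :
    (pvPairs xs).filter (fun pr => pr == (i, j)) = if i ∈ xs ∧ j ∈ xs then [(i, j)] else [] := by
  induction xs with
  | nil => simp [pvPairs]
  | cons x t ih =>
    have hlt : ∀ y ∈ t, x < y := fun y hy => (List.pairwise_cons.1 hs).1 y hy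
    have hnd : t.Nodup := List.Pairwise.imp (fun h => ne_of_lt h) (List.pairwise_cons.1 hs).2
    rw [pvPairs, List.filter_append, List.filter_map]
    by_cases hxi : x = i
    · subst hxi
      have hxt : x ∉ t := fun hmem => lt_irrefl x (hlt x hmem)
      have h2 : (pvPairs t).filter (fun pr => pr == (x, j)) = [] := by
        rw [List.filter_eq_nil_iff]
        intro pr hpr hbeq
        have := pv_mem_pvPairs hpr
        rw [beq_iff_eq] at hbeq
        subst hbeq
        exact hxt this.1
      rw [h2]
      have h1 : (t.filter ((fun pr => pr == (x, j)) ∘ (fun y => (x, y)))) = t.filter (fun y => y == j) := by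
        apply List.filter_congr
        intro y _
        simp [Function.comp, Prod.ext_iff]
      rw [h1]
      have h3 : t.filter (fun y => y == j) = if j ∈ t then [j] else [] := by
        rw [List.filter_beq]
        by_cases hj : j ∈ t
        · rw [if_pos hj, List.count_eq_one_of_mem hnd hj, List.replicate_one]
        · rw [if_neg hj, List.count_eq_zero_of_not_mem hj, List.replicate_zero]
      rw [h3]
      have hje : j ∈ x :: t ↔ j ∈ t := by
        constructor
        · intro h; rcases List.mem_cons.1 h with h | h
          · omega
          · exact h
        · exact List.mem_cons_of_mem _
      by_cases hj : j ∈ t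
      · simp [hj, hje.2 hj]
      · have : ¬ (j ∈ x :: t) := fun h => hj (hje.1 h)
        simp [hj, this]
    · have h1 : (t.filter ((fun pr => pr == (i, j)) ∘ (fun y => (x, y)))) = [] := by
        rw [List.filter_eq_nil_iff]
        intro y _ hbeq
        simp only [Function.comp, beq_iff_eq, Prod.ext_iff] at hbeq
        exact hxi hbeq.1
      rw [h1, ih (List.pairwise_cons.1 hs).2]
      simp only [List.map_nil, List.nil_append]
      have hie : i ∈ x :: t ↔ i ∈ t := by
        constructor
        · intro h; rcases List.mem_cons.1 h with h | h
          · exact absurd h.symm hxi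
          · exact h
        · exact List.mem_cons_of_mem _
      by_cases hit : i ∈ t
      · have hxj : x ≠ j := fun he => by
          have := hlt i hit; omega
        have hje : j ∈ x :: t ↔ j ∈ t := by
          constructor
          · intro h; rcases List.mem_cons.1 h with h | h
            · exact absurd h.symm hxj
            · exact h
          · exact List.mem_cons_of_mem _
        simp only [hie, hje]
      · simp [hie, hit]






-- bucket characterisation
theorem pv_buckets_eq (paths : List (List Int)) (k : Int) :
    pvBuckets paths k =
      ((pvLk paths k).map (fun idx => (pvVal paths k idx, idx))).foldl
        (fun d q => d.modify q.1 [] (fun l => l ++ [q.2])) PySem.Dict.empty := by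
  rw [pvBuckets, PySem.List.foldl_ite_eq_foldl_filter]
  rw [List.foldl_map]
  rfl

theorem pv_buckets_keys (paths : List (List Int)) (k : Int) :
    (pvBuckets paths k).keys = PySem.Set.ofList ((pvLk paths k).map (pvVal paths k)) := by
  rw [pvBuckets, PySem.List.foldl_ite_eq_foldl_filter]
  rw [PySem.Dict.keys_foldl_modify_key
    ((PySem.List.pyRange 0 (PySem.List.len paths)).filter
      (fun x => decide (k < PySem.List.len (pvPath paths x))))
    (fun idx => PySem.List.pyGetD (pvPath paths idx) k 0) ([] : List Int)
    (fun _ idx => (fun l => l ++ [idx])) PySem.Dict.empty]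
  rfl

theorem pv_buckets_nodup (paths : List (List Int)) (k : Int) :
    (pvBuckets paths k).keys.Nodup := by
  rw [pv_buckets_keys]
  exact PySem.Set.nodup_ofList _

theorem pv_buckets_getD (paths : List (List Int)) (k v : Int) :
    (pvBuckets paths k).getD v [] = (pvLk paths k).filter (fun idx => pvVal paths k idx == v) := by
  rw [pv_buckets_eq, PySem.Dict.getD_foldl_modify_append]
  rw [List.filter_map, List.map_map]
  simp only [PySem.Dict.getD_empty, List.nil_append]
  have : ((fun q : Int × Int => q.2) ∘ fun idx => (pvVal paths k idx, idx)) = id := rfl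
  rw [this, List.map_id]
  rfl

theorem pv_Lk_sorted (paths : List (List Int)) (k : Int) :
    (pvLk paths k).Pairwise (· < ·) := by
  apply List.Pairwise.filter
  rw [pv_pyRange_one_eq]
  apply List.Pairwise.map
  · intro a b (h : a < b)
    show (0 : Int) + a < 0 + b
    omega
  · exact List.pairwise_lt_range

theorem pv_flatMap_keys_ite {ks : List Int} (hnd : ks.Nodup) (w : Int) (Q : Prop) [Decidable Q] :
    ks.flatMap (fun v => if v = w ∧ Q then [v] else []) = if w ∈ ks ∧ Q then [w] else [] := by
  induction ks with
  | nil => simp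
  | cons x t ih =>
    have hnd' : t.Nodup := (List.nodup_cons.1 hnd).2
    have hxt : x ∉ t := (List.nodup_cons.1 hnd).1
    rw [List.flatMap_cons, ih hnd']
    by_cases hx : x = w
    · subst hx
      by_cases hQ : Q
      · simp [hQ, hxt]
      · simp [hQ]
    · by_cases hw : w ∈ t
      · have : w ∈ x :: t := List.mem_cons_of_mem _ hw
        simp [hx, hw, this]
      · have : ¬ w ∈ x :: t := by
          intro h
          rcases List.mem_cons.1 h with h | h
          · exact hx h.symm
          · exact hw h
        simp [hx, hw, this]

-- per-timestep contribution to the (i, j) entry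
theorem pv_Qk_filter (paths : List (List Int)) (k i j : Int) (hij : i < j) :
    ((pvQk paths k).filter (fun q => q.1 == (i, j))).map (fun q => q.2)
    = if i ∈ pvLk paths k ∧ j ∈ pvLk paths k ∧ pvVal paths k j = pvVal paths k i
      then [pvVal paths k i] else [] := by
  have hnd := pv_buckets_nodup paths k
  rw [pvQk, PySem.Dict.items_eq_map_keys _ hnd ([] : List Int)]
  rw [List.flatMap_map, List.filter_flatMap, List.map_flatMap]
  rw [List.flatMap_congr (l := (pvBuckets paths k).keys)
    (g := fun v => if v = pvVal paths k i ∧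
      (i ∈ pvLk paths k ∧ j ∈ pvLk paths k ∧ pvVal paths k j = pvVal paths k i)
      then [v] else []) ?_]
  · rw [pv_flatMap_keys_ite hnd]
    refine if_congr ?_ rfl rfl
    constructor
    · exact fun h => h.2
    · intro hQ
      refine ⟨?_, hQ⟩
      rw [pv_buckets_keys, PySem.Set.mem_ofList]
      exact List.mem_map.2 ⟨i, hQ.1, rfl⟩
  · intro v hv
    show _ = if v = pvVal paths k i ∧
      (i ∈ pvLk paths k ∧ j ∈ pvLk paths k ∧ pvVal paths k j = pvVal paths k i)
      then [v] else []
    have hgd := pv_buckets_getD paths k v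
    have hsorted : ((pvBuckets paths k).getD v []).Pairwise (· < ·) := by
      rw [hgd]; exact List.Pairwise.filter _ (pv_Lk_sorted paths k)
    rw [pv_pairs_index_eq (fun a b => ((a, b), v)) ((pvBuckets paths k).getD v [])]
    rw [List.filter_map, List.map_map]
    have h1 : ((fun q : (Int × Int) × Int => q.1 == (i, j)) ∘
        (fun pr : Int × Int => ((pr.1, pr.2), v))) = (fun pr => pr == (i, j)) := by
      funext pr
      simp [Function.comp]
    rw [h1, pv_filter_pvPairs hsorted hij]
    have hmem : ∀ x : Int, x ∈ (pvBuckets paths k).getD v [] ↔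
        (x ∈ pvLk paths k ∧ pvVal paths k x = v) := by
      intro x
      rw [hgd, List.mem_filter, beq_iff_eq]
    by_cases hc : i ∈ (pvBuckets paths k).getD v [] ∧ j ∈ (pvBuckets paths k).getD v []
    · rw [if_pos hc]
      have hi := (hmem i).1 hc.1
      have hj2 := (hmem j).1 hc.2
      rw [if_pos ⟨hi.2.symm, hi.1, hj2.1, by rw [hj2.2, hi.2]⟩]
      rfl
    · rw [if_neg hc, if_neg]
      · rfl
      · rintro ⟨hv2, hiL, hjL, hvj⟩
        exact hc ⟨(hmem i).2 ⟨hiL, hv2.symm⟩, (hmem j).2 ⟨hjL, by rw [hvj, ← hv2]⟩⟩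

theorem pv_len_le_maxlen (paths : List (List Int)) {p : List Int} (hp : p ∈ paths) :
    PySem.List.len p ≤ pvMaxlen paths := by
  rw [pvMaxlen]
  have hcong : paths.foldl (fun m p => if PySem.List.len p > m then PySem.List.len p else m) 0
      = paths.foldl (fun m p => max m (PySem.List.len p)) 0 := by
    apply PySem.List.foldl_congr_mem
    intro acc x _
    by_cases h : PySem.List.len x > acc
    · rw [if_pos h, max_eq_right (by omega)]
    · rw [if_neg h, max_eq_left (by omega)]
  rw [hcong]
  exact (PySem.List.le_foldl_max_int paths (fun p => PySem.List.len p) 0).2 p hp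

theorem pv_byPair_getD (paths : List (List Int)) (i j : Int)
    (h0 : 0 ≤ i) (hij : i < j) (hj : j < PySem.List.len paths) :
    (pvByPair paths).getD (i, j) [] = pvVals paths i j := by
  have hlen_i : PySem.List.len (pvPath paths i) = ((pvPath paths i).length : Int) := by
    simp [PySem.List.len]
  have hpmem : pvPath paths i ∈ paths ∧ pvPath paths j ∈ paths := by
    constructor
    · rw [pvPath, PySem.List.pyGetD_eq_getElem paths [] h0 (by simpa [PySem.List.len] using lt_trans hij hj)]
      exact List.getElem_mem _
    · rw [pvPath, PySem.List.pyGetD_eq_getElem paths [] (by omega) (by simpa [PySem.List.len] using hj)]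
      exact List.getElem_mem _
  have hmin0 : 0 ≤ min (PySem.List.len (pvPath paths i)) (PySem.List.len (pvPath paths j)) := by
    simp [PySem.List.len]
  have hminmax : min (PySem.List.len (pvPath paths i)) (PySem.List.len (pvPath paths j))
      ≤ pvMaxlen paths := le_trans (min_le_left _ _) (pv_len_le_maxlen paths hpmem.1)
  rw [pvByPair]
  rw [show pvStep = fun (d : PySem.Dict (Int × Int) (List Int)) (q : (Int × Int) × Int) =>
    d.modify q.1 [] (fun l => l ++ [q.2]) from rfl]
  rw [PySem.Dict.getD_foldl_modify_append]
  simp only [PySem.Dict.getD_empty, List.nil_append]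
  rw [List.filter_flatMap, List.map_flatMap]
  rw [List.flatMap_congr (l := PySem.List.pyRange 0 (pvMaxlen paths))
    (g := fun k => if k < PySem.List.len (pvPath paths i) ∧ k < PySem.List.len (pvPath paths j) ∧
      pvVal paths k i = pvVal paths k j then [pvVal paths k i] else []) ?_]
  · rw [PySem.List.pyRange_one_append 0 _ (pvMaxlen paths) hmin0 hminmax, List.flatMap_append]
    have h2 : (PySem.List.pyRange (min (PySem.List.len (pvPath paths i)) (PySem.List.len (pvPath paths j))) (pvMaxlen paths)).flatMap
        (fun k => if k < PySem.List.len (pvPath paths i) ∧ k < PySem.List.len (pvPath paths j) ∧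
          pvVal paths k i = pvVal paths k j then [pvVal paths k i] else []) = [] := by
      rw [List.flatMap_congr (g := fun _ => ([] : List Int)) ?_]
      · simp
      · intro k hk
        rw [PySem.List.mem_pyRange_one] at hk
        rw [if_neg]
        rintro ⟨h1, h2, _⟩
        omega
    rw [h2, List.append_nil]
    rw [List.flatMap_congr (g := fun k => if pvVal paths k i = pvVal paths k j
      then [pvVal paths k i] else []) ?_]
    · rw [pv_flatMap_ite (fun k => pvVal paths k i = pvVal paths k j) (fun k => pvVal paths k i)]
      rfl
    · intro k hk
      rw [PySem.List.mem_pyRange_one] at hk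
      refine if_congr ?_ rfl rfl
      constructor
      · exact fun h => h.2.2
      · intro h
        exact ⟨by omega, by omega, h⟩
  · intro k hk
    rw [PySem.List.mem_pyRange_one] at hk
    rw [pv_Qk_filter paths k i j hij]
    refine if_congr ?_ rfl rfl
    have hmem : ∀ x : Int, 0 ≤ x → x < PySem.List.len paths →
        (x ∈ pvLk paths k ↔ k < PySem.List.len (pvPath paths x)) := by
      intro x hx0 hxn
      rw [pvLk, List.mem_filter, PySem.List.mem_pyRange_one, decide_eq_true_eq]
      constructor
      · exact fun h => h.2
      · exact fun h => ⟨⟨hx0, hxn⟩, h⟩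
    rw [hmem i h0 (lt_trans hij hj), hmem j (by omega) hj]
    constructor
    · rintro ⟨h1, h2, h3⟩
      exact ⟨h1, h2, h3.symm⟩
    · rintro ⟨h1, h2, h3⟩
      exact ⟨h1, h2, h3.symm⟩

-- shapes of the two ports
theorem pv_A_shape (paths : List (List Int)) :
    find_conflict paths
    = (PySem.List.pyRange 0 (PySem.List.len paths - 1)).flatMap (fun i =>
        (PySem.List.pyRange (i + 1) (PySem.List.len paths)).flatMap (fun j =>
          (pvVals paths i j).map (fun v => (i + 1, j + 1, v)))) := by
  rw [find_conflict]
  simp only [PySem.List.foldl_append_ite, PySem.List.foldl_append_eq_flatMap, List.nil_append]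
  apply List.flatMap_congr
  intro i _
  apply List.flatMap_congr
  intro j _
  rw [pvVals, List.map_map]
  rfl

theorem pv_B_shape (paths : List (List Int)) :
    find_conflict_alt paths
    = (PySem.List.pyRange 0 (PySem.List.len paths - 1)).flatMap (fun i =>
        (PySem.List.pyRange (i + 1) (PySem.List.len paths)).flatMap (fun j =>
          ((pvByPair paths).getD (i, j) []).map (fun v => (i + 1, j + 1, v)))) := by
  have hunfold : find_conflict_alt paths =
    (PySem.List.pyRange 0 (PySem.List.len paths - 1)).foldl (fun conflicts i =>
      (PySem.List.pyRange (i + 1) (PySem.List.len paths)).foldl (fun conflicts j =>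
        (((PySem.List.pyRange 0 (pvMaxlen paths)).foldl (fun byPair k =>
            (pvBuckets paths k).items.foldl (fun byPair vi =>
              (PySem.List.pyRange 0 (PySem.List.len vi.2)).foldl (fun byPair a =>
                (PySem.List.pyRange (a + 1) (PySem.List.len vi.2)).foldl (fun byPair b =>
                  byPair.modify (PySem.List.pyGetD vi.2 a 0, PySem.List.pyGetD vi.2 b 0) []
                    (fun l => l ++ [vi.1])) byPair) byPair) byPair) PySem.Dict.empty).getD (i, j) []).foldl
          (fun conflicts v => conflicts ++ [(i + 1, j + 1, v)]) conflicts) conflicts) [] := rfl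
  rw [hunfold]
  have hBP : (PySem.List.pyRange 0 (pvMaxlen paths)).foldl (fun byPair k =>
      (pvBuckets paths k).items.foldl (fun byPair vi =>
        (PySem.List.pyRange 0 (PySem.List.len vi.2)).foldl (fun byPair a =>
          (PySem.List.pyRange (a + 1) (PySem.List.len vi.2)).foldl (fun byPair b =>
            byPair.modify (PySem.List.pyGetD vi.2 a 0, PySem.List.pyGetD vi.2 b 0) []
              (fun l => l ++ [vi.1])) byPair) byPair) byPair) PySem.Dict.empty
      = pvByPair paths := by
    rw [pvByPair, pv_foldl_flatMap (pvQk paths) pvStep]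
    apply PySem.List.foldl_congr_mem
    intro acc k _
    rw [pvQk, pv_foldl_flatMap]
    apply PySem.List.foldl_congr_mem
    intro acc2 vi _
    rw [pv_foldl_flatMap]
    apply PySem.List.foldl_congr_mem
    intro acc3 a _
    rw [List.foldl_map]
    rfl
  rw [hBP]
  simp only [PySem.List.foldl_append_singleton_eq_map, PySem.List.foldl_append_eq_flatMap,
    List.nil_append]

-- ===== VERDICT (by name: the statement is the Claim_ definition above) =====
theorem find_conflict_spec : Claim_equal_find_conflict := by
  intro paths _
  show find_conflict paths = find_conflict_alt paths
  rw [pv_A_shape, pv_B_shape]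
  simp only [List.flatMap]
  apply congrArg
  apply List.map_congr_left
  intro i hi
  apply congrArg
  apply List.map_congr_left
  intro j hj
  rw [PySem.List.mem_pyRange_one] at hi hj
  rw [pv_byPair_getD paths i j (by omega) (by omega) (by omega)]
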